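-- pv_equiv track=rewrite | github.com/juspay/hyperswitch-docs | reformat_docs.py | fix_heading_hierarchy
-- ===== SOURCE A (Python) =====
-- def fix_heading_hierarchy(content: str) -> str:
--     """
--     Rule 1: Fix heading hierarchy.
--     - Single H1 at top
--     - ## H2 for sections, ### H3 for sub-sections
--     - No skipped levels
--     """
--     lines = content.split('\n')
--     result = []
--     h1_found = False
--
--     for i, line in enumerate(lines):
--         # Check for H1 (single #)
--         if line.strip().startswith('# ') and not line.strip().startswith('## '):
--             if h1_found:
--                 # Convert duplicate H1 to H2
--                 line = '#' + line.strip()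
--             else:
--                 h1_found = True
--
--         # Fix skipped levels (e.g., # followed by ###)
--         # This is handled by ensuring proper progression
--
--         result.append(line)
--
--     return '\n'.join(result)
-- ===== SOURCE B (Python) =====
-- def fix_heading_hierarchy(content: str) -> str:
--     lines = content.split('\n')
--
--     def is_h1(line):
--         s = line.strip()
--         return s.startswith('# ') and not s.startswith('## ')
--
--     first = next((i for i, line in enumerate(lines) if is_h1(line)), None)
--     return '\n'.join(
--         '#' + line.strip() if is_h1(line) and i != first else line
--         for i, line in enumerate(lines)
--     )
-- ===== Notes on version B (the rewrite author's own statement) =====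
-- stated objective: alternative
-- what changed: Replaces A's stateful loop with a running h1_found flag by first locating the index of the first H1 line up front (next over enumerate) and then one uniform index-aware map that demotes every H1 except the line at that index.
import Mathlib
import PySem

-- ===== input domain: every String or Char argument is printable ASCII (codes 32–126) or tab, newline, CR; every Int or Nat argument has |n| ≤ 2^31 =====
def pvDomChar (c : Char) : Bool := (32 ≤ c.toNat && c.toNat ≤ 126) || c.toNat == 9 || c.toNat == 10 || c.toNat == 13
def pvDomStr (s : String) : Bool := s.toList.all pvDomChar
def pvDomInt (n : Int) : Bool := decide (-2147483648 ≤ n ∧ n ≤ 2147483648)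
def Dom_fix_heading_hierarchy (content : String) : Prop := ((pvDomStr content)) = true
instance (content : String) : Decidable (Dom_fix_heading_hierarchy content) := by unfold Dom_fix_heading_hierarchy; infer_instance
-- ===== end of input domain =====

-- B replaces A's running h1_found flag with a first-H1 index computed up front and a uniform
-- index-aware map; same result, alternative decomposition (no speed claim).

-- ===== PORT A =====
-- A's loop: append each line, demoting an H1 to H2 once the flag is set.
def fix_heading_hierarchy (content : String) : String :=
  let lines := PySem.Chars.splitOn content.toList ['\n']
  let st := lines.foldl (fun (st : List (List Char) × Bool) line =>
    if PySem.Chars.startswith (PySem.Chars.strip line) ['#', ' ']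
        && !PySem.Chars.startswith (PySem.Chars.strip line) ['#', '#', ' '] then
      if st.2 then (st.1 ++ ['#' :: PySem.Chars.strip line], st.2)
      else (st.1 ++ [line], true)
    else (st.1 ++ [line], st.2)) ([], false)
  String.ofList (PySem.Chars.join ['\n'] st.1)

-- ===== PORT B =====
-- B's helper is_h1
def pvIsH1 (line : List Char) : Bool :=
  PySem.Chars.startswith (PySem.Chars.strip line) ['#', ' ']
    && !PySem.Chars.startswith (PySem.Chars.strip line) ['#', '#', ' ']

def fix_heading_hierarchy_alt (content : String) : String :=
  let lines := PySem.Chars.splitOn content.toList ['\n']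
  let first := lines.findIdx? pvIsH1
  String.ofList (PySem.Chars.join ['\n']
    (lines.zipIdx.map (fun p =>
      if pvIsH1 p.1 && !(first == some p.2) then '#' :: PySem.Chars.strip p.1 else p.1)))

-- ===== PRECONDITION & SPEC =====
def Spec_fix_heading_hierarchy (content : String) (out : String) : Prop := out = fix_heading_hierarchy_alt content
instance (content : String) (out : String) : Decidable (Spec_fix_heading_hierarchy content out) := by unfold Spec_fix_heading_hierarchy; infer_instance

-- ===== CLAIM (what is proved, stated in full; the proofs are below) =====
def Claim_equal_fix_heading_hierarchy : Prop := ∀ (content : String), Dom_fix_heading_hierarchy content → Spec_fix_heading_hierarchy content (fix_heading_hierarchy content)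

-- ===== LEMMAS AND PROOFS =====

-- A's step function, named for the proofs (definitionally equal to the port's lambda)
def pvStepA (st : List (List Char) × Bool) (line : List Char) : List (List Char) × Bool :=
  if pvIsH1 line then
    if st.2 then (st.1 ++ ['#' :: PySem.Chars.strip line], st.2)
    else (st.1 ++ [line], true)
  else (st.1 ++ [line], st.2)

-- A's processing as structural recursion on the lines, carrying the flag
def pvProcA (b : Bool) : List (List Char) → List (List Char)
  | [] => []
  | l :: ls =>
    if pvIsH1 l then
      if b then ('#' :: PySem.Chars.strip l) :: pvProcA b ls
      else l :: pvProcA true ls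
    else l :: pvProcA b ls

lemma pvFoldA (ls : List (List Char)) (acc : List (List Char)) (b : Bool) :
    (ls.foldl pvStepA (acc, b)).1 = acc ++ pvProcA b ls := by
  induction ls generalizing acc b with
  | nil => simp [pvProcA]
  | cons l ls ih =>
    simp only [List.foldl_cons, pvStepA, pvProcA]
    by_cases h : pvIsH1 l
    · cases b <;> simp [h, ih]
    · simp [h, ih]

def pvMapB (l : List Char) : List Char :=
  if pvIsH1 l then '#' :: PySem.Chars.strip l else l

-- once the flag is true, A maps every line uniformly
lemma pvProcA_true (ls : List (List Char)) : pvProcA true ls = ls.map pvMapB := by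
  induction ls with
  | nil => rfl
  | cons l ls ih => by_cases h : pvIsH1 l <;> simp [pvProcA, pvMapB, h, ih]

lemma pvProcA_no_h1 (b : Bool) (ls : List (List Char)) (h : ∀ l ∈ ls, pvIsH1 l = false) :
    pvProcA b ls = ls := by
  induction ls with
  | nil => rfl
  | cons l ls ih =>
    have hl := h l (by simp)
    simp [pvProcA, hl, ih (fun x hx => h x (by simp [hx]))]

lemma pvProcA_prefix (pre rest : List (List Char)) (h : ∀ l ∈ pre, pvIsH1 l = false) :
    pvProcA false (pre ++ rest) = pre ++ pvProcA false rest := by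
  induction pre with
  | nil => rfl
  | cons p pre ih =>
    have hp := h p (by simp)
    simp only [List.cons_append, pvProcA, hp, Bool.false_eq_true, if_false,
      ih (fun x hx => h x (by simp [hx]))]

-- B's per-pair transform for a fixed first index
def pvMapBIdx (first : Option Nat) (p : List Char × Nat) : List Char :=
  if pvIsH1 p.1 && !(first == some p.2) then '#' :: PySem.Chars.strip p.1 else p.1

lemma pvMapB_no_h1 (first : Option Nat) (ls : List (List Char)) (s : Nat)
    (h : ∀ l ∈ ls, pvIsH1 l = false) :
    (ls.zipIdx s).map (pvMapBIdx first) = ls := by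
  induction ls generalizing s with
  | nil => rfl
  | cons l ls ih =>
    have hl := h l (by simp)
    simp [List.zipIdx_cons, pvMapBIdx, hl, ih (s + 1) (fun x hx => h x (by simp [hx]))]

lemma pvMapB_past (k : Nat) (ls : List (List Char)) (s : Nat) (hs : k < s) :
    (ls.zipIdx s).map (pvMapBIdx (some k)) = ls.map pvMapB := by
  induction ls generalizing s with
  | nil => rfl
  | cons l ls ih =>
    have hne : (some k == some s) = false := by simp; omega
    by_cases h : pvIsH1 l <;>
      simp [List.zipIdx_cons, pvMapBIdx, pvMapB, h, hne, ih (s + 1) (by omega)]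

lemma pvLines_eq (ls : List (List Char)) :
    (ls.zipIdx.map (pvMapBIdx (ls.findIdx? pvIsH1))) = pvProcA false ls := by
  cases hf : ls.findIdx? pvIsH1 with
  | none =>
    have h : ∀ l ∈ ls, pvIsH1 l = false := by
      intro l hl
      have := List.findIdx?_eq_none_iff.mp hf l hl
      simpa using this
    rw [pvProcA_no_h1 _ _ h, pvMapB_no_h1 _ _ _ h]
  | some k =>
    obtain ⟨hk, hget, hbefore⟩ := List.findIdx?_eq_some_iff_getElem.mp hf
    have hpre : ∀ l ∈ ls.take k, pvIsH1 l = false := by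
      intro l hl
      obtain ⟨i, hi, rfl⟩ := List.getElem_of_mem hl
      have hik : i < k := by simp at hi; omega
      have := hbefore i hik
      simp only [List.getElem_take]
      simpa using this
    have hlen : (ls.take k).length = k := by simp; omega
    have hdecomp : ls = ls.take k ++ ls[k] :: ls.drop (k + 1) := by
      conv_lhs => rw [← List.take_append_drop k ls]
      rw [List.drop_eq_getElem_cons hk]
    conv_lhs => rw [hdecomp]
    conv_rhs => rw [hdecomp]
    rw [List.zipIdx_append, List.zipIdx_cons, List.map_append, List.map_cons,
      pvMapB_no_h1 _ _ _ hpre, pvProcA_prefix _ _ hpre]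
    have hself : pvMapBIdx (some k) (ls[k], 0 + (ls.take k).length) = ls[k] := by
      simp [pvMapBIdx, hlen]
    rw [hself, hlen]
    simp only [pvProcA, hget, if_pos, pvProcA_true]
    rw [pvMapB_past k _ _ (by omega)]
    simp

-- ===== VERDICT (by name: the statement is the Claim_ definition above) =====
theorem fix_heading_hierarchy_spec : Claim_equal_fix_heading_hierarchy := by
  intro content _
  show fix_heading_hierarchy content = fix_heading_hierarchy_alt content
  have hA : fix_heading_hierarchy content
      = String.ofList (PySem.Chars.join ['\n']
          (((PySem.Chars.splitOn content.toList ['\n']).foldl pvStepA ([], false)).1)) := rfl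
  have hB : fix_heading_hierarchy_alt content
      = String.ofList (PySem.Chars.join ['\n']
          ((PySem.Chars.splitOn content.toList ['\n']).zipIdx.map
            (pvMapBIdx ((PySem.Chars.splitOn content.toList ['\n']).findIdx? pvIsH1)))) := rfl
  rw [hA, hB, pvFoldA _ [] false, List.nil_append, pvLines_eq]
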